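-- pv_equiv track=rewrite | github.com/GustikS/NeuraLogic | Frontend/scratch/dynet_dynamic.py | create_xor_instances
-- ===== SOURCE A (Python) =====
-- def create_xor_instances(num_rounds=20000):
--     questions = []
--     answers = []
--     for round in range(num_rounds):
--         for x1 in 0, 1:
--             for x2 in 0, 1:
--                 answer = 0 if x1 == x2 else 1
--                 questions.append((x1, x2))
--                 answers.append(answer)
--     return questions, answers
-- ===== SOURCE B (Python) =====
-- def create_xor_instances(num_rounds=20000):
--     q_base = [(0, 0), (0, 1), (1, 0), (1, 1)]
--     a_base = [0, 1, 1, 0]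
--     return q_base * num_rounds, a_base * num_rounds
-- ===== Notes on version B (the rewrite author's own statement) =====
-- stated objective: simpler
-- what changed: Replaces the triple nested loop that recomputes each XOR answer with the four fixed (input, answer) base lists written as literals and replicated by list multiplication.
import Mathlib
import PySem

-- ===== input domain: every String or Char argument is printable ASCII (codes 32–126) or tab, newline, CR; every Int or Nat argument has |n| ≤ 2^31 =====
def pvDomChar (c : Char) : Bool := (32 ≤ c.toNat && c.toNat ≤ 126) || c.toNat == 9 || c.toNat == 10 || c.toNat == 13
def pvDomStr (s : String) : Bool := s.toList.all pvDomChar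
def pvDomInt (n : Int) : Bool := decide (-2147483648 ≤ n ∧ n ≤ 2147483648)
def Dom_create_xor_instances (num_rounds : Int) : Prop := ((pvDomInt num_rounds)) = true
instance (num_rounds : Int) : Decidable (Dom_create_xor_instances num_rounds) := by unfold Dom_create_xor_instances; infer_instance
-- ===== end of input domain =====

-- B replaces A's triple nested loop (recomputing each XOR answer) by the four literal base
-- (question, answer) pairs replicated with list multiplication; objective: simpler.

-- ===== PORT A =====
-- literal port: outer loop over range(num_rounds), inner loops over the literal tuples (0, 1)
def create_xor_instances (num_rounds : Int) : (List (Int × Int)) × List Int :=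
  let st :=
    (PySem.List.pyRange 0 num_rounds 1).foldl
      (fun (st : List (Int × Int) × List Int) _round =>
        ([(0 : Int), 1]).foldl
          (fun st x1 =>
            ([(0 : Int), 1]).foldl
              (fun st x2 =>
                let answer : Int := if x1 == x2 then 0 else 1
                (st.1 ++ [(x1, x2)], st.2 ++ [answer]))
              st)
          st)
      ([], [])
  (st.1, st.2)

-- ===== PORT B =====
-- list * k  in Python = k copies concatenated (empty for k ≤ 0) = flatten of replicate k.toNat
def create_xor_instances_alt (num_rounds : Int) : (List (Int × Int)) × List Int :=
  let q_base : List (Int × Int) := [(0, 0), (0, 1), (1, 0), (1, 1)]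
  let a_base : List Int := [0, 1, 1, 0]
  ((List.replicate num_rounds.toNat q_base).flatten,
   (List.replicate num_rounds.toNat a_base).flatten)

-- ===== PRECONDITION & SPEC =====
def Spec_create_xor_instances (num_rounds : Int) (out : (List (Int × Int)) × List Int) : Prop := out = create_xor_instances_alt num_rounds
instance (num_rounds : Int) (out : (List (Int × Int)) × List Int) : Decidable (Spec_create_xor_instances num_rounds out) := by unfold Spec_create_xor_instances; infer_instance

-- ===== CLAIM (what is proved, stated in full; the proofs are below) =====
def Claim_equal_create_xor_instances : Prop := ∀ (num_rounds : Int), Dom_create_xor_instances num_rounds → Spec_create_xor_instances num_rounds (create_xor_instances num_rounds)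

-- ===== LEMMAS AND PROOFS =====

-- one round of A's inner two loops appends exactly the four base pairs / answers
theorem pv_round_step (st : List (Int × Int) × List Int) :
    ([(0 : Int), 1]).foldl
      (fun st x1 =>
        ([(0 : Int), 1]).foldl
          (fun st x2 =>
            let answer : Int := if x1 == x2 then 0 else 1
            (st.1 ++ [(x1, x2)], st.2 ++ [answer]))
          st)
      st
    = (st.1 ++ [(0, 0), (0, 1), (1, 0), (1, 1)], st.2 ++ [0, 1, 1, 0]) := by
  simp [List.foldl]

-- folding A's round body over any list of rounds appends |l| copies of the base lists
theorem pv_fold_rounds (l : List Int) (q : List (Int × Int)) (a : List Int) :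
    l.foldl
      (fun (st : List (Int × Int) × List Int) _round =>
        ([(0 : Int), 1]).foldl
          (fun st x1 =>
            ([(0 : Int), 1]).foldl
              (fun st x2 =>
                let answer : Int := if x1 == x2 then 0 else 1
                (st.1 ++ [(x1, x2)], st.2 ++ [answer]))
              st)
          st)
      (q, a)
    = (q ++ (List.replicate l.length [((0 : Int), (0 : Int)), (0, 1), (1, 0), (1, 1)]).flatten,
       a ++ (List.replicate l.length [(0 : Int), 1, 1, 0]).flatten) := by
  induction l generalizing q a with
  | nil => simp
  | cons hd tl ih =>
      rw [List.foldl_cons, pv_round_step, ih]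
      simp [List.replicate_succ]

-- ===== VERDICT (by name: the statement is the Claim_ definition above) =====
theorem create_xor_instances_spec : Claim_equal_create_xor_instances := by
  intro n _
  show create_xor_instances n = create_xor_instances_alt n
  unfold create_xor_instances create_xor_instances_alt
  rw [pv_fold_rounds]
  simp [PySem.List.length_pyRange_one]
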